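-- pv_equiv track=rewrite | github.com/muneebaifrah/Unstop-100-Days-Coding-Sprint | Day-10/1.Box_ab_Pattern.py | follows_ab_pattern
-- ===== SOURCE A (Python) =====
-- def follows_ab_pattern(s):
--     seen_b = False
--
--     for ch in s:
--         if ch == 'b':
--             seen_b = True
--         elif ch == 'a' and seen_b:
--             return "NO"
--
--     return "YES"
-- ===== SOURCE B (Python) =====
-- def follows_ab_pattern(s):
--     idx = s.find('b')
--     if idx == -1:
--         return "YES"
--     return "NO" if 'a' in s[idx:] else "YES"
-- ===== Notes on version B (the rewrite author's own statement) =====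
-- stated objective: faster
-- what changed: Replaces the per-character stateful flag loop with a first-occurrence lookup via str.find followed by a substring membership test on the suffix starting there (both C-implemented scans).
import Mathlib
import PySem

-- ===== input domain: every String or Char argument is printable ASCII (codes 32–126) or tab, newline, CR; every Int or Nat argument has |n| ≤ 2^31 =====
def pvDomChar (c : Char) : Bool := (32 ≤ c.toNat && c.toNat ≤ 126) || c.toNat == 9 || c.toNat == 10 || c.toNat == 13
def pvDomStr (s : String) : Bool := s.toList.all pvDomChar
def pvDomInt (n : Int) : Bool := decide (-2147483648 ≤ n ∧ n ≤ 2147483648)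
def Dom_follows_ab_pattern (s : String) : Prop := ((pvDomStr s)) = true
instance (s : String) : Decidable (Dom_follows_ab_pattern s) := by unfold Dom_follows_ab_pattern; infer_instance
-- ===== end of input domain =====

-- B replaces A's stateful flag loop with a first-occurrence lookup plus a suffix membership test (constant-factor faster in Python: C-implemented scans).

-- ===== PORT A =====
-- the for-loop with its seen_b flag and early return
def followsGo : List Char → Bool → String
  | [], _ => "YES"
  | c :: cs, seen =>
    if c = 'b' then followsGo cs true
    else if c = 'a' ∧ seen = true then "NO"
    else followsGo cs seen

def follows_ab_pattern (s : String) : String := followsGo s.toList false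

-- ===== PORT B =====
def follows_ab_pattern_alt (s : String) : String :=
  let idx := PySem.Str.find s "b"
  if idx = -1 then "YES"
  else if PySem.Str.isIn "a" (PySem.Str.slice s (some idx) none) then "NO" else "YES"

-- ===== PRECONDITION & SPEC =====
def Spec_follows_ab_pattern (s : String) (out : String) : Prop := out = follows_ab_pattern_alt s
instance (s : String) (out : String) : Decidable (Spec_follows_ab_pattern s out) := by unfold Spec_follows_ab_pattern; infer_instance

-- ===== CLAIM (what is proved, stated in full; the proofs are below) =====
def Claim_equal_follows_ab_pattern : Prop := ∀ (s : String), Dom_follows_ab_pattern s → Spec_follows_ab_pattern s (follows_ab_pattern s)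

-- ===== LEMMAS AND PROOFS =====

theorem singleton_infix (c : Char) (l : List Char) : [c] <:+: l ↔ c ∈ l := by
  constructor
  · intro h; exact h.subset (by simp)
  · intro h
    obtain ⟨p, q, rfl⟩ := List.append_of_mem h
    exact ⟨p, q, by simp⟩

theorem find_b_cons_self (cs : List Char) : PySem.Chars.find ('b' :: cs) ['b'] = 0 := by
  have hinf : ['b'] <:+: ('b' :: cs) := ⟨[], cs, by simp⟩
  have h0 : 0 ≤ PySem.Chars.find ('b' :: cs) ['b'] := (PySem.Chars.find_nonneg_iff _ _).2 hinf
  obtain ⟨hp, hmin⟩ := PySem.Chars.find_spec h0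
  by_contra hne
  have hpos : 0 < (PySem.Chars.find ('b' :: cs) ['b']).toNat := by omega
  exact hmin 0 hpos ⟨cs, by simp⟩

theorem find_b_cons_ne (c : Char) (cs : List Char) (h : c ≠ 'b') :
    PySem.Chars.find (c :: cs) ['b'] =
      if PySem.Chars.find cs ['b'] = -1 then -1 else PySem.Chars.find cs ['b'] + 1 := by
  have hcons : (['b'] <:+: (c :: cs)) ↔ (['b'] <:+: cs) := by
    rw [List.infix_cons_iff]
    constructor
    · rintro (hpre | hin)
      · rw [List.cons_prefix_cons] at hpre; exact absurd hpre.1.symm h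
      · exact hin
    · exact Or.inr
  by_cases hcs : ['b'] <:+: cs
  · have hn0 : 0 ≤ PySem.Chars.find cs ['b'] := (PySem.Chars.find_nonneg_iff _ _).2 hcs
    have hm0 : 0 ≤ PySem.Chars.find (c :: cs) ['b'] :=
      (PySem.Chars.find_nonneg_iff _ _).2 (hcons.2 hcs)
    obtain ⟨hpn, hminn⟩ := PySem.Chars.find_spec hn0
    obtain ⟨hpm, hminm⟩ := PySem.Chars.find_spec hm0
    set n := PySem.Chars.find cs ['b'] with hn
    set m := PySem.Chars.find (c :: cs) ['b'] with hm
    have hmne0 : m.toNat ≠ 0 := by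
      intro h0
      rw [h0] at hpm
      simp only [List.drop_zero, List.cons_prefix_cons] at hpm
      exact h hpm.1.symm
    -- (c::cs).drop m.toNat = cs.drop (m.toNat - 1)
    have hdrop : (c :: cs).drop m.toNat = cs.drop (m.toNat - 1) := by
      obtain ⟨k, hk⟩ : ∃ k, m.toNat = k + 1 := ⟨m.toNat - 1, by omega⟩
      rw [hk]; simp
    rw [hdrop] at hpm
    have hub : ¬ (m.toNat - 1 < n.toNat) := fun hlt => hminn _ hlt hpm
    have hlb : ¬ (n.toNat + 1 < m.toNat) := by
      intro hlt
      exact hminm (n.toNat + 1) hlt (by simpa using hpn)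
    have : m = n + 1 := by omega
    rw [this, if_neg (by omega)]
  · have h1 : PySem.Chars.find cs ['b'] = -1 := (PySem.Chars.find_eq_neg_one_iff _ _).2 hcs
    have h2 : PySem.Chars.find (c :: cs) ['b'] = -1 :=
      (PySem.Chars.find_eq_neg_one_iff _ _).2 (fun hin => hcs (hcons.1 hin))
    rw [h1, h2, if_pos rfl]

theorem isIn_a_iff (l : List Char) : PySem.Chars.isIn ['a'] l = true ↔ 'a' ∈ l := by
  rw [PySem.Chars.isIn_iff_infix, singleton_infix]

theorem goA_true (l : List Char) : followsGo l true = if 'a' ∈ l then "NO" else "YES" := by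
  induction l with
  | nil => simp [followsGo]
  | cons c cs ih =>
    by_cases hc : c = 'b'
    · subst hc
      simp only [followsGo, ih]
      simp
    · by_cases ha : c = 'a'
      · subst ha
        simp [followsGo]
      · have ha' : ¬ ('a' = c) := fun h => ha h.symm
        simp only [followsGo, if_neg hc, ih]
        simp [ha', ha]

theorem goA_false (l : List Char) :
    followsGo l false =
      (if PySem.Chars.find l ['b'] = -1 then "YES"
       else if PySem.Chars.isIn ['a'] (l.drop (PySem.Chars.find l ['b']).toNat) then "NO"
       else "YES") := by
  induction l with
  | nil =>
    have : PySem.Chars.find ([] : List Char) ['b'] = -1 :=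
      (PySem.Chars.find_eq_neg_one_iff _ _).2 (by simp)
    simp [followsGo, this]
  | cons c cs ih =>
    by_cases hc : c = 'b'
    · subst hc
      rw [show followsGo ('b' :: cs) false = followsGo cs true from by simp [followsGo],
        goA_true, find_b_cons_self]
      have hmem : ('a' ∈ 'b' :: cs) ↔ ('a' ∈ cs) := by simp
      by_cases hmem' : 'a' ∈ cs
      · rw [if_pos hmem', if_neg (by norm_num), if_pos ((isIn_a_iff _).2 (by simp [hmem']))]
      · rw [if_neg hmem', if_neg (by norm_num),
          if_neg (by simp only [isIn_a_iff]; simp [hmem'])]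
    · have hstep : followsGo (c :: cs) false = followsGo cs false := by
        simp [followsGo, hc]
      rw [hstep, ih, find_b_cons_ne c cs hc]
      by_cases hfin : PySem.Chars.find cs ['b'] = -1
      · simp [hfin]
      · have hn0 : 0 ≤ PySem.Chars.find cs ['b'] := by
          have := PySem.Chars.neg_one_le_find cs ['b']; omega
        have hne : PySem.Chars.find cs ['b'] + 1 ≠ -1 := by omega
        have htn : (PySem.Chars.find cs ['b'] + 1).toNat = (PySem.Chars.find cs ['b']).toNat + 1 := by
          omega
        rw [if_neg hfin, if_neg hfin, if_neg hne, htn, List.drop_succ_cons]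

-- ===== VERDICT (by name: the statement is the Claim_ definition above) =====
theorem follows_ab_pattern_spec : Claim_equal_follows_ab_pattern := by
  intro s _
  unfold Spec_follows_ab_pattern follows_ab_pattern follows_ab_pattern_alt
  have hfind : PySem.Str.find s "b" = PySem.Chars.find s.toList ['b'] := by
    rw [PySem.Str.find_eq]; rfl
  rw [goA_false]
  simp only [hfind]
  by_cases hf : PySem.Chars.find s.toList ['b'] = -1
  · rw [if_pos hf, if_pos hf]
  · have h0 : 0 ≤ PySem.Chars.find s.toList ['b'] := by
      have := PySem.Chars.neg_one_le_find s.toList ['b']; omega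
    have hisIn : PySem.Str.isIn "a" (PySem.Str.slice s (some (PySem.Chars.find s.toList ['b'])) none)
        = PySem.Chars.isIn ['a'] (s.toList.drop (PySem.Chars.find s.toList ['b']).toNat) := by
      rw [PySem.Str.isIn_eq, PySem.Str.toList_slice, PySem.Chars.slice_eq_listSlice,
        PySem.List.slice_from _ h0]
      rfl
    rw [if_neg hf, if_neg hf, hisIn]
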